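-- pv_equiv track=rewrite | github.com/jackedney/choresir | src/services/personal_chore_service.py | fuzzy_match_personal_chore
-- ===== SOURCE A (Python) =====
-- def fuzzy_match_personal_chore(
--     chores: list[dict],
--     title_query: str,
-- ) -> dict | None:
--     """Fuzzy match a personal chore by title.
--
--     Uses same logic as household chore fuzzy matching:
--     1. Exact match (case-insensitive)
--     2. Contains match
--     3. Partial word match
--
--     Args:
--         chores: List of personal chore records
--         title_query: User's search query
--
--     Returns:
--         Best matching chore or None
--     """
--     title_lower = title_query.lower().strip()
--
--     # Exact match
--     for chore in chores:
--         if chore["title"].lower() == title_lower: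
--             return chore
--
--     # Contains match
--     for chore in chores:
--         if title_lower in chore["title"].lower():
--             return chore
--
--     # Partial word match
--     query_words = set(title_lower.split())
--     for chore in chores:
--         chore_words = set(chore["title"].lower().split())
--         if query_words & chore_words:  # Intersection
--             return chore
--
--     return None
-- ===== SOURCE B (Python) =====
-- def fuzzy_match_personal_chore(
--     chores: list[dict],
--     title_query: str,
-- ) -> dict | None:
--     """Single-pass tiered fuzzy match: 0=exact, 1=contains, 2=word overlap."""
--     q = title_query.lower().strip()
--     q_words = set(q.split())
--     best = None
--     best_tier = 3
--     for chore in chores: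
--         t = chore["title"].lower()
--         if t == q:
--             return chore  # exact match beats everything; first wins
--         if q in t:
--             tier = 1
--         elif not q_words.isdisjoint(t.split()):
--             tier = 2
--         else:
--             tier = 3
--         if tier < best_tier:
--             best_tier = tier
--             best = chore
--     return best
-- ===== Notes on version B (the rewrite author's own statement) =====
-- stated objective: alternative
-- what changed: Replaces A's three sequential scans over the chore list (exact, contains, word-overlap) with a single pass that assigns each chore a priority tier, keeps the first chore at the lowest tier seen, and returns immediately on an exact match.
import Mathlib
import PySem

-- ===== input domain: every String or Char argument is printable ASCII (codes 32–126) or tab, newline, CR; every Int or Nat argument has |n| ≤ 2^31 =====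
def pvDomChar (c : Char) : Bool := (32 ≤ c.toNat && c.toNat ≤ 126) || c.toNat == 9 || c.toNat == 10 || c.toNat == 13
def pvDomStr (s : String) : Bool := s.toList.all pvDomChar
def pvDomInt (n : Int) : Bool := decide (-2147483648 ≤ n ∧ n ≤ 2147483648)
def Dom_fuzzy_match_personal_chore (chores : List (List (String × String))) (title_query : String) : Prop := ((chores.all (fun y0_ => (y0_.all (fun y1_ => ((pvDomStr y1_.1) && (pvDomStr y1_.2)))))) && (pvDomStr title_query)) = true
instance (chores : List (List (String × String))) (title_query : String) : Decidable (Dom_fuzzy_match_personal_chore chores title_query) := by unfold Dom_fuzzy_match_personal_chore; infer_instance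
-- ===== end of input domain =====

-- B replaces A's three sequential scans by a single pass that tracks the first chore at the
-- lowest priority tier seen (objective: alternative algorithm, same asymptotic cost).

-- ===== PORT A =====
-- chore["title"]: first-match lookup in the association list; KeyError (no "title" key) is
-- excluded by Pre_, so the .getD "" default is never reached on admitted inputs.
def pvTitle (c : List (String × String)) : String :=
  ((c.find? (fun p => p.1 == "title")).map Prod.snd).getD ""

def fuzzy_match_personal_chore (chores : List (List (String × String))) (title_query : String) : Option (List (String × String)) :=
  let tl := PySem.Str.strip (PySem.Str.lower title_query)
  -- Exact match loop
  match chores.find? (fun c => PySem.Str.lower (pvTitle c) == tl) with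
  | some c => some c
  | none =>
    -- Contains match loop
    match chores.find? (fun c => PySem.Str.isIn tl (PySem.Str.lower (pvTitle c))) with
    | some c => some c
    | none =>
      -- Partial word match loop (truthiness of the set intersection)
      let qw := PySem.Set.ofList (PySem.Str.split₀ tl)
      chores.find? (fun c =>
        !(PySem.Set.inter qw (PySem.Set.ofList (PySem.Str.split₀ (PySem.Str.lower (pvTitle c))))).isEmpty)

-- ===== PORT B =====
-- the single pass of Source B: best chore so far, best tier so far, early return on exact match
def pvLoopB (tl : String) (qw : PySem.Set String) :
    List (List (String × String)) → Option (List (String × String)) → Nat → Option (List (String × String))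
  | [], best, _ => best
  | c :: rest, best, bt =>
    let t := PySem.Str.lower (pvTitle c)
    if t == tl then some c
    else
      let tier : Nat :=
        if PySem.Str.isIn tl t then 1
        else if !(PySem.Set.isdisjoint qw (PySem.Str.split₀ t)) then 2
        else 3
      if tier < bt then pvLoopB tl qw rest (some c) tier
      else pvLoopB tl qw rest best bt

def fuzzy_match_personal_chore_alt (chores : List (List (String × String))) (title_query : String) : Option (List (String × String)) :=
  let tl := PySem.Str.strip (PySem.Str.lower title_query)
  let qw := PySem.Set.ofList (PySem.Str.split₀ tl)
  pvLoopB tl qw chores none 3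

-- ===== PRECONDITION & SPEC =====
-- Pre_ excludes exactly the inputs on which the Python (A and B alike) raises KeyError: a chore
-- without a "title" key that the scan reaches, i.e. with no exact title match strictly before it.
def Pre_fuzzy_match_personal_chore (chores : List (List (String × String))) (title_query : String) : Prop :=
  ∀ i < chores.length, ((chores.getD i []).find? (fun p => p.1 == "title")).isSome = true ∨
    ∃ j < i, PySem.Str.lower (pvTitle (chores.getD j [])) = PySem.Str.strip (PySem.Str.lower title_query)
instance (chores : List (List (String × String))) (title_query : String) : Decidable (Pre_fuzzy_match_personal_chore chores title_query) := by unfold Pre_fuzzy_match_personal_chore; infer_instance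

def pvWitness_fuzzy_match_personal_chore : (List (List (String × String))) × String :=
  ([[("title", "Wash dishes")], [("title", "mop floor")]], "wash dishes")

def Spec_fuzzy_match_personal_chore (chores : List (List (String × String))) (title_query : String) (out : Option (List (String × String))) : Prop := out = fuzzy_match_personal_chore_alt chores title_query
instance (chores : List (List (String × String))) (title_query : String) (out : Option (List (String × String))) : Decidable (Spec_fuzzy_match_personal_chore chores title_query out) := by unfold Spec_fuzzy_match_personal_chore; infer_instance

-- ===== CLAIM (what is proved, stated in full; the proofs are below) =====
def Claim_equal_fuzzy_match_personal_chore : Prop := ∀ (chores : List (List (String × String))) (title_query : String), Dom_fuzzy_match_personal_chore chores title_query → Pre_fuzzy_match_personal_chore chores title_query → Spec_fuzzy_match_personal_chore chores title_query (fuzzy_match_personal_chore chores title_query)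

-- ===== LEMMAS AND PROOFS =====

-- the priority tier of a chore: 0 exact, 1 contains, 2 word overlap, 3 no match
def pvTier (tl : String) (c : List (String × String)) : Nat :=
  let t := PySem.Str.lower (pvTitle c)
  if t == tl then 0
  else if PySem.Str.isIn tl t then 1
  else if !(PySem.Set.isdisjoint (PySem.Set.ofList (PySem.Str.split₀ tl)) (PySem.Str.split₀ t)) then 2
  else 3

def pvMin (tl : String) (l : List (List (String × String))) (bt : Nat) : Nat :=
  l.foldl (fun a c => min a (pvTier tl c)) bt

lemma pvMin_le (tl : String) (l : List (List (String × String))) (bt : Nat) :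
    pvMin tl l bt ≤ bt := by
  induction l generalizing bt with
  | nil => simp [pvMin]
  | cons c l ih =>
    calc pvMin tl (c :: l) bt = pvMin tl l (min bt (pvTier tl c)) := rfl
    _ ≤ min bt (pvTier tl c) := ih _
    _ ≤ bt := Nat.min_le_left _ _

lemma pvMin_le_mem (tl : String) (l : List (List (String × String))) (bt : Nat)
    (c : List (String × String)) (hc : c ∈ l) : pvMin tl l bt ≤ pvTier tl c := by
  induction l generalizing bt with
  | nil => cases hc
  | cons d l ih =>
    rcases List.mem_cons.mp hc with rfl | hc
    · calc pvMin tl (c :: l) bt = pvMin tl l (min bt (pvTier tl c)) := rfl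
      _ ≤ min bt (pvTier tl c) := pvMin_le _ _ _
      _ ≤ pvTier tl c := Nat.min_le_right _ _
    · exact ih _ hc

lemma pvMin_eq_or_mem (tl : String) (l : List (List (String × String))) (bt : Nat) :
    pvMin tl l bt = bt ∨ ∃ c ∈ l, pvTier tl c = pvMin tl l bt := by
  induction l generalizing bt with
  | nil => exact Or.inl rfl
  | cons d l ih =>
    have h : pvMin tl (d :: l) bt = pvMin tl l (min bt (pvTier tl d)) := rfl
    rcases ih (min bt (pvTier tl d)) with h0 | ⟨c, hc, hcc⟩
    · rcases Nat.le_total bt (pvTier tl d) with hle | hle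
      · left; rw [h, h0]; omega
      · right; exact ⟨d, List.mem_cons_self, by rw [h, h0]; omega⟩
    · right; exact ⟨c, List.mem_cons_of_mem _ hc, by rw [h, ← hcc]⟩

lemma find?_congr_mem {α : Type} (l : List α) (p q : α → Bool)
    (h : ∀ x ∈ l, p x = q x) : l.find? p = l.find? q := by
  induction l with
  | nil => rfl
  | cons a l ih =>
    simp only [List.find?_cons, h a List.mem_cons_self]
    cases q a
    · exact ih (fun x hx => h x (List.mem_cons_of_mem _ hx))
    · rfl

-- A's set-intersection truthiness test equals B's isdisjoint test
lemma inter_isEmpty_eq_isdisjoint (s : PySem.Set String) (L : List String) :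
    (PySem.Set.inter s (PySem.Set.ofList L)).isEmpty = PySem.Set.isdisjoint s L := by
  rw [Bool.eq_iff_iff, List.isEmpty_iff, List.eq_nil_iff_forall_not_mem, PySem.Set.isdisjoint_iff]
  constructor
  · intro h x hx hxL
    exact h x (by rw [PySem.Set.mem_inter]; exact ⟨hx, (PySem.Set.mem_ofList _ _).mpr hxL⟩)
  · intro h x hx
    rw [PySem.Set.mem_inter _ _ _, PySem.Set.mem_ofList _ _] at hx
    exact h x hx.1 hx.2

-- closed form of B's loop: first chore achieving the running minimum tier
lemma pvLoopB_eq (tl : String) (l : List (List (String × String)))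
    (best : Option (List (String × String))) (bt : Nat) (hbt : 0 < bt) :
    pvLoopB tl (PySem.Set.ofList (PySem.Str.split₀ tl)) l best bt =
      if pvMin tl l bt < bt then l.find? (fun c => pvTier tl c == pvMin tl l bt) else best := by
  induction l generalizing best bt with
  | nil => simp [pvLoopB, pvMin]
  | cons c l ih =>
    have hmin : pvMin tl (c :: l) bt = pvMin tl l (min bt (pvTier tl c)) := rfl
    by_cases h0 : PySem.Str.lower (pvTitle c) == tl
    · -- exact match: early return
      have ht : pvTier tl c = 0 := by simp [pvTier, h0]
      have hm : pvMin tl (c :: l) bt = 0 := by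
        rw [hmin, ht]; have := pvMin_le tl l (min bt 0); omega
      rw [hm]
      simp only [pvLoopB, h0, List.find?_cons, ht]
      simp [hbt]
    · -- tier ∈ {1,2,3}
      have htpos : 0 < pvTier tl c := by
        simp only [pvTier, h0]; split_ifs <;> simp_all
      have hstep : pvLoopB tl (PySem.Set.ofList (PySem.Str.split₀ tl)) (c :: l) best bt =
          if pvTier tl c < bt then pvLoopB tl (PySem.Set.ofList (PySem.Str.split₀ tl)) l (some c) (pvTier tl c)
          else pvLoopB tl (PySem.Set.ofList (PySem.Str.split₀ tl)) l best bt := by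
        simp only [pvLoopB, pvTier, h0, Bool.false_eq_true, if_false]
      rw [hstep]
      by_cases h1 : pvTier tl c < bt
      · rw [if_pos h1, ih _ _ htpos]
        have hm : pvMin tl (c :: l) bt = pvMin tl l (pvTier tl c) := by
          rw [hmin]; congr 1; omega
        have hml := pvMin_le tl l (pvTier tl c)
        by_cases h2 : pvMin tl l (pvTier tl c) < pvTier tl c
        · rw [if_pos h2, hm, if_pos (by omega), List.find?_cons]
          have hne : (pvTier tl c == pvMin tl l (pvTier tl c)) = false := by
            simp only [beq_eq_false_iff_ne, ne_eq]; omega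
          rw [hne]
        · have heq : pvMin tl l (pvTier tl c) = pvTier tl c := by omega
          rw [if_neg h2, hm, heq, if_pos h1, List.find?_cons]
          rw [show (pvTier tl c == pvTier tl c) = true from by simp]
      · rw [if_neg h1, ih _ _ hbt]
        have hm : pvMin tl (c :: l) bt = pvMin tl l bt := by
          rw [hmin]; congr 1; omega
        rw [hm]
        by_cases h2 : pvMin tl l bt < bt
        · rw [if_pos h2, if_pos h2, List.find?_cons]
          have hml := pvMin_le tl l bt
          have hne : (pvTier tl c == pvMin tl l bt) = false := by
            simp only [beq_eq_false_iff_ne, ne_eq]; omega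
          rw [hne]
        · rw [if_neg h2, if_neg h2]

-- tier characterisations of A's three loop predicates
lemma tier_eq_zero_iff (tl : String) (c : List (String × String)) :
    (pvTier tl c == 0) = (PySem.Str.lower (pvTitle c) == tl) := by
  simp only [pvTier]; split_ifs <;> simp_all

lemma tier_ge_one (tl : String) (c : List (String × String))
    (h : 1 ≤ pvTier tl c) : (PySem.Str.lower (pvTitle c) == tl) = false := by
  by_contra hc
  simp only [Bool.not_eq_false] at hc
  simp [pvTier, hc] at h

lemma tier_eq_one_iff (tl : String) (c : List (String × String)) (h : 1 ≤ pvTier tl c) :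
    (pvTier tl c == 1) = PySem.Str.isIn tl (PySem.Str.lower (pvTitle c)) := by
  have h0 := tier_ge_one tl c h
  simp only [pvTier, h0, Bool.false_eq_true, if_false]
  split_ifs <;> simp_all

lemma tier_ge_two (tl : String) (c : List (String × String))
    (h : 2 ≤ pvTier tl c) : PySem.Str.isIn tl (PySem.Str.lower (pvTitle c)) = false := by
  by_contra hc
  simp only [Bool.not_eq_false] at hc
  simp only [pvTier, hc] at h
  split_ifs at h <;> omega

lemma tier_eq_two_iff (tl : String) (c : List (String × String)) (h : 2 ≤ pvTier tl c) :
    (pvTier tl c == 2) =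
      !(PySem.Set.inter (PySem.Set.ofList (PySem.Str.split₀ tl))
          (PySem.Set.ofList (PySem.Str.split₀ (PySem.Str.lower (pvTitle c))))).isEmpty := by
  have h0 := tier_ge_one tl c (by omega)
  have h1 := tier_ge_two tl c h
  rw [inter_isEmpty_eq_isdisjoint]
  simp only [pvTier, h0, h1, Bool.false_eq_true, if_false]
  split_ifs <;> simp_all

lemma tier_ge_three (tl : String) (c : List (String × String)) (h : 3 ≤ pvTier tl c) :
    (!(PySem.Set.inter (PySem.Set.ofList (PySem.Str.split₀ tl))
        (PySem.Set.ofList (PySem.Str.split₀ (PySem.Str.lower (pvTitle c))))).isEmpty) = false := by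
  rw [inter_isEmpty_eq_isdisjoint]
  by_contra hc
  simp only [Bool.not_eq_false] at hc
  simp only [pvTier, hc] at h
  split_ifs at h <;> omega

-- ===== VERDICT (by name: the statement is the Claim_ definition above) =====
theorem fuzzy_match_personal_chore_spec : Claim_equal_fuzzy_match_personal_chore := by
  intro chores q _ _
  unfold Spec_fuzzy_match_personal_chore
  simp only [fuzzy_match_personal_chore, fuzzy_match_personal_chore_alt]
  generalize PySem.Str.strip (PySem.Str.lower q) = tl
  rw [pvLoopB_eq tl chores none 3 (by omega)]
  have hor := pvMin_eq_or_mem tl chores 3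
  have hm3' := pvMin_le tl chores 3
  have hbound' := fun c hc => pvMin_le_mem tl chores 3 c hc
  generalize hm : pvMin tl chores 3 = m at *
  have hm3 : m ≤ 3 := hm3'
  have hbound : ∀ c ∈ chores, m ≤ pvTier tl c := hbound'
  by_cases hlt : m < 3
  · rw [if_pos hlt]
    have ⟨w, hw, hwt⟩ : ∃ c ∈ chores, pvTier tl c = m := by
      rcases hor with h | h
      · omega
      · exact h
    interval_cases m
    · -- exact match exists
      have : chores.find? (fun c => PySem.Str.lower (pvTitle c) == tl) =
          chores.find? (fun c => pvTier tl c == 0) :=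
        (find?_congr_mem _ _ _ (fun c _ => tier_eq_zero_iff tl c)).symm
      rw [this]
      cases hfind : chores.find? (fun c => pvTier tl c == 0) with
      | none => rw [List.find?_eq_none] at hfind; exact absurd (by simp [hwt]) (hfind w hw)
      | some c => rfl
    · -- no exact, contains exists
      have hA1 : chores.find? (fun c => PySem.Str.lower (pvTitle c) == tl) = none := by
        rw [List.find?_eq_none]
        intro c hc
        simp only [tier_ge_one tl c (hbound c hc), Bool.false_eq_true, not_false_eq_true]
      rw [hA1]
      have : chores.find? (fun c => PySem.Str.isIn tl (PySem.Str.lower (pvTitle c))) =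
          chores.find? (fun c => pvTier tl c == 1) :=
        (find?_congr_mem _ _ _ (fun c hc => tier_eq_one_iff tl c (hbound c hc))).symm
      rw [this]
      cases hfind : chores.find? (fun c => pvTier tl c == 1) with
      | none => rw [List.find?_eq_none] at hfind; exact absurd (by simp [hwt]) (hfind w hw)
      | some c => rfl
    · -- no exact, no contains, word overlap exists
      have hA1 : chores.find? (fun c => PySem.Str.lower (pvTitle c) == tl) = none := by
        rw [List.find?_eq_none]
        intro c hc
        simp only [tier_ge_one tl c (by have := hbound c hc; omega), Bool.false_eq_true, not_false_eq_true]
      have hA2 : chores.find? (fun c => PySem.Str.isIn tl (PySem.Str.lower (pvTitle c))) = none := by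
        rw [List.find?_eq_none]
        intro c hc
        simp only [tier_ge_two tl c (hbound c hc), Bool.false_eq_true, not_false_eq_true]
      rw [hA1, hA2]
      exact find?_congr_mem _ _ _ (fun c hc => (tier_eq_two_iff tl c (hbound c hc)).symm)
  · rw [if_neg hlt]
    have hall : ∀ c ∈ chores, pvTier tl c = 3 := by
      intro c hc
      have := hbound c hc
      have : 3 ≤ pvTier tl c := by omega
      have hle : pvTier tl c ≤ 3 := by
        simp only [pvTier]; split_ifs <;> omega
      omega
    have hA1 : chores.find? (fun c => PySem.Str.lower (pvTitle c) == tl) = none := by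
      rw [List.find?_eq_none]; intro c hc
      simp only [tier_ge_one tl c (by rw [hall c hc]; omega), Bool.false_eq_true, not_false_eq_true]
    have hA2 : chores.find? (fun c => PySem.Str.isIn tl (PySem.Str.lower (pvTitle c))) = none := by
      rw [List.find?_eq_none]; intro c hc
      simp only [tier_ge_two tl c (by rw [hall c hc]; omega), Bool.false_eq_true, not_false_eq_true]
    have hA3 : chores.find? (fun c =>
        !(PySem.Set.inter (PySem.Set.ofList (PySem.Str.split₀ tl))
            (PySem.Set.ofList (PySem.Str.split₀ (PySem.Str.lower (pvTitle c))))).isEmpty) = none := by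
      rw [List.find?_eq_none]; intro c hc
      simp only [tier_ge_three tl c (le_of_eq (hall c hc).symm), Bool.false_eq_true, not_false_eq_true]
    rw [hA1, hA2, hA3]
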